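-- pv_equiv track=rewrite | github.com/dan-jimenez/TextEncriptation | funciones.py | recorrer_lista_aux
-- ===== SOURCE A (Python) =====
-- def recorrer_lista_aux(letra,n,alfabeto,nueva_lista):
--     """
--     La funcion recorrer lista aux
--
--     Parametros:
--     letra: parametro expecifico
--     n: parametro expecifico
--     alfabeto: parametro expecifico
--     nueva lista: parametro expecifico
--
--     Retorna:
--     es la llamda recursiva de la funcion recorrer lista
--     """
--     if(n>25):
--         return recorrer_lista_aux(letra,0,alfabeto,nueva_lista)
--     elif (letra==alfabeto[n]):
--         return nueva_lista
--     else: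
--         nueva_lista+=alfabeto[n]
--         return recorrer_lista_aux(letra,n+1,alfabeto,nueva_lista)
-- ===== SOURCE B (Python) =====
-- def recorrer_lista_aux(letra, n, alfabeto, nueva_lista):
--     if n > 25:
--         n = 0
--     partes = []
--     while alfabeto[n] != letra:
--         partes.append(alfabeto[n])
--         n = 0 if n == 25 else n + 1
--     return nueva_lista + ''.join(partes)
-- ===== Notes on version B (the rewrite author's own statement) =====
-- stated objective: idiomatic
-- what changed: Replaces the unbounded tail recursion that rebuilds a growing string on every call with an iterative while-loop over the same index walk that collects the visited characters in a list and joins them once at the end; Pre_ excludes only inputs on which A raises IndexError or recurses forever (the letter is never reached by its scan), i.e. exactly A's terminating domain.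
import Mathlib
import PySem

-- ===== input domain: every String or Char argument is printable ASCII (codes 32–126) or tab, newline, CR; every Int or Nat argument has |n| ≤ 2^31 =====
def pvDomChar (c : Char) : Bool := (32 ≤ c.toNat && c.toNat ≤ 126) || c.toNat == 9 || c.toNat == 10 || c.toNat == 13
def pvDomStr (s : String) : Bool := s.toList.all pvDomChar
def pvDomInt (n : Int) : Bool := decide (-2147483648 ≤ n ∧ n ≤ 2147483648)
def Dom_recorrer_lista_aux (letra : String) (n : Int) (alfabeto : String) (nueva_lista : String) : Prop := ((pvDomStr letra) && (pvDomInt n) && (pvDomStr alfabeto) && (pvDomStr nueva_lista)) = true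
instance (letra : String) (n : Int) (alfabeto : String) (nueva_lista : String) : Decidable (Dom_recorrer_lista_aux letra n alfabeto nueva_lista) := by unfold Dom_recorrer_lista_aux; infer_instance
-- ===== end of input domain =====

-- B replaces A's unbounded tail recursion (rebuild the string on each call, wrap at 26) by an
-- iterative loop over the same index walk, collecting characters in a list joined once; objective: idiomatic.

-- ===== PORT A =====
-- A's recursion is not structurally terminating (it resets n to 0 past 25), so the port carries a
-- fuel counter large enough for every input Pre_ admits; "" stands for the excluded IndexError /
-- fuel exhaustion (A raises or recurses forever there, outside Pre_).
def pvAuxA (letra : String) (alfabeto : String) : Nat → Int → String → String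
  | 0, _, _ => ""
  | fuel+1, n, acc =>
    if n > 25 then pvAuxA letra alfabeto fuel 0 acc
    else
      match PySem.Str.pyGet? alfabeto n with
      | none => ""
      | some c =>
        if letra = String.ofList [c] then acc
        else pvAuxA letra alfabeto fuel (n+1) (acc ++ String.ofList [c])

def recorrer_lista_aux (letra : String) (n : Int) (alfabeto : String) (nueva_lista : String) : String :=
  pvAuxA letra alfabeto ((26 - n).toNat + 28) n nueva_lista

-- ===== PORT B =====
-- Source B's while-loop as a fuel recursion over the loop state (n, partes); none stands for the
-- excluded IndexError / fuel exhaustion (B raises or loops forever there, outside Pre_).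
def pvLoopB (letra : String) (alfabeto : String) : Nat → Int → List Char → Option (List Char)
  | 0, _, _ => none
  | fuel+1, i, partes =>
    match PySem.Str.pyGet? alfabeto i with
    | none => none
    | some c =>
      if String.ofList [c] ≠ letra then
        pvLoopB letra alfabeto fuel (if i = 25 then 0 else i + 1) (partes ++ [c])
      else some partes

def recorrer_lista_aux_alt (letra : String) (n : Int) (alfabeto : String) (nueva_lista : String) : String :=
  let n' := if n > 25 then 0 else n
  match pvLoopB letra alfabeto ((26 - n).toNat + 28) n' [] with
  | none => ""
  | some partes => nueva_lista ++ String.ofList partes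

-- ===== PRECONDITION & SPEC =====
-- Pre_ is exactly the terminating domain of A: the scanned character must appear (as the whole of
-- letra) either in the first scan window alfabeto[s:26] (alfabeto[s:] for negative s, which must be
-- in range) or, after the wrap-around reset, in alfabeto[:26] (requiring len(alfabeto) ≥ 26 when
-- s ≥ 0, since A must walk indices s..25 first). Outside Pre_ A raises IndexError or recurses forever.
def Pre_recorrer_lista_aux (letra : String) (n : Int) (alfabeto : String) (nueva_lista : String) : Prop :=
  let s := if n > 25 then 0 else n
  let cs := alfabeto.toList
  (s < 0 → -(cs.length : Int) ≤ s) ∧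
  (letra.toList ∈ ((if s < 0 then PySem.List.slice cs (some s) none
                    else PySem.List.slice cs (some s) (some 26)).map (fun c => [c]))
   ∨ ((0 ≤ s → 26 ≤ (cs.length : Int)) ∧
      letra.toList ∈ ((PySem.List.slice cs none (some 26)).map (fun c => [c]))))
instance (letra : String) (n : Int) (alfabeto : String) (nueva_lista : String) : Decidable (Pre_recorrer_lista_aux letra n alfabeto nueva_lista) := by unfold Pre_recorrer_lista_aux; infer_instance

def pvWitness_recorrer_lista_aux : String × Int × String × String := ("c", 1, "abcde", "x")

def Spec_recorrer_lista_aux (letra : String) (n : Int) (alfabeto : String) (nueva_lista : String) (out : String) : Prop := out = recorrer_lista_aux_alt letra n alfabeto nueva_lista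
instance (letra : String) (n : Int) (alfabeto : String) (nueva_lista : String) (out : String) : Decidable (Spec_recorrer_lista_aux letra n alfabeto nueva_lista out) := by unfold Spec_recorrer_lista_aux; infer_instance

-- ===== CLAIM (what is proved, stated in full; the proofs are below) =====
def Claim_equal_recorrer_lista_aux : Prop := ∀ (letra : String) (n : Int) (alfabeto : String) (nueva_lista : String), Dom_recorrer_lista_aux letra n alfabeto nueva_lista → Pre_recorrer_lista_aux letra n alfabeto nueva_lista → Spec_recorrer_lista_aux letra n alfabeto nueva_lista (recorrer_lista_aux letra n alfabeto nueva_lista)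

-- ===== LEMMAS AND PROOFS =====

-- the first scan window alfabeto[s:26] / alfabeto[s:], on the character-list side
def pvScan (cs : List Char) (s : Int) : List Char :=
  if s < 0 then PySem.List.slice cs (some s) none else PySem.List.slice cs (some s) (some 26)
-- the wrap-around window alfabeto[:26]
def pvT (cs : List Char) : List Char := PySem.List.slice cs none (some 26)
-- the prefix strictly before the first occurrence of q
def pvB (l : List Char) (q : Char) : List Char := l.takeWhile (fun c => c != q)

lemma pvB_cons_self (q : Char) (t : List Char) : pvB (q :: t) q = [] := by
  simp [pvB]

lemma pvB_cons_ne {q c : Char} (t : List Char) (h : c ≠ q) :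
    pvB (c :: t) q = c :: pvB t q := by
  simp [pvB, h]

lemma pvB_left {q : Char} {t : List Char} (u : List Char) (h : q ∈ t) :
    pvB (t ++ u) q = pvB t q := by
  induction t with
  | nil => exact absurd h List.not_mem_nil
  | cons c t ih =>
    by_cases hc : c = q
    · subst hc; rw [List.cons_append, pvB_cons_self, pvB_cons_self]
    · have hm : q ∈ t := by
        rcases List.mem_cons.mp h with h' | h'
        · exact absurd h'.symm hc
        · exact h'
      rw [List.cons_append, pvB_cons_ne _ hc, pvB_cons_ne _ hc, ih hm]

lemma pvB_right {q : Char} {t u : List Char} (h : q ∉ t) :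
    pvB (t ++ u) q = t ++ pvB u q := by
  induction t with
  | nil => simp
  | cons c t ih =>
    have hc : c ≠ q := fun he => h (he ▸ List.mem_cons_self)
    rw [List.cons_append, pvB_cons_ne _ hc, ih (fun hm => h (List.mem_cons_of_mem _ hm)),
        List.cons_append]

-- pvB is the take up to the first index holding q
lemma pv_scan_nonneg (cs : List Char) (s : Int) (h : 0 ≤ s) :
    pvScan cs s = (cs.drop s.toNat).take ((26:Int).toNat - s.toNat) := by
  rw [pvScan, if_neg (by omega)]
  rw [PySem.List.slice_toNat cs h (by norm_num)]

lemma pv_clampIdx_neg (m : Nat) (s : Int) (h1 : s < 0) (h2 : -(m : Int) ≤ s) :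
    PySem.List.clampIdx m s = ((m : Int) + s).toNat := by
  simp only [PySem.List.clampIdx]
  split_ifs <;> omega

lemma pv_scan_neg (cs : List Char) (s : Int) (h1 : s < 0) (h2 : -(cs.length : Int) ≤ s) :
    pvScan cs s = cs.drop ((cs.length : Int) + s).toNat := by
  rw [pvScan, if_pos h1, PySem.List.slice_some_none, pv_clampIdx_neg _ _ h1 h2]

lemma pv_scan_zero (cs : List Char) : pvScan cs 0 = pvT cs := by
  rw [pv_scan_nonneg cs 0 le_rfl, pvT, PySem.List.slice_to cs (by norm_num)]
  rfl

lemma pv_scan_26 (cs : List Char) : pvScan cs 26 = [] := by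
  rw [pv_scan_nonneg cs 26 (by norm_num)]
  simp

lemma pv_scan_cons_nonneg (cs : List Char) (s : Int) (h0 : 0 ≤ s) (h26 : s < 26)
    (hm : s.toNat < cs.length) :
    pvScan cs s = cs[s.toNat] :: pvScan cs (s + 1) := by
  rw [pv_scan_nonneg cs s h0, pv_scan_nonneg cs (s+1) (by omega)]
  have h2 : (s+1).toNat = s.toNat + 1 := by omega
  have h : (26:Int).toNat - s.toNat = ((26:Int).toNat - (s+1).toNat) + 1 := by omega
  rw [h2, List.drop_eq_getElem_cons hm, h, List.take_succ_cons, h2]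

lemma pv_scan_cons_neg (cs : List Char) (s : Int) (h1 : s + 1 < 0) (h2 : -(cs.length : Int) ≤ s) :
    pvScan cs s = cs[((cs.length : Int) + s).toNat]'(by omega) :: pvScan cs (s + 1) := by
  have e : ((cs.length : Int) + (s+1)).toNat = ((cs.length : Int) + s).toNat + 1 := by omega
  rw [pv_scan_neg cs s (by omega) h2, pv_scan_neg cs (s+1) h1 (by omega), e,
      List.drop_eq_getElem_cons (by omega)]

lemma pv_scan_neg_one (cs : List Char) (h : 1 ≤ cs.length) :
    pvScan cs (-1) = [cs[cs.length - 1]'(by omega)] := by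
  rw [pv_scan_neg cs (-1) (by omega) (by omega)]
  have h1 : ((cs.length : Int) + -1).toNat = cs.length - 1 := by omega
  rw [h1, List.drop_eq_getElem_cons (by omega)]
  congr 1
  have h2 : cs.length - 1 + 1 = cs.length := by omega
  rw [h2, List.drop_length]

lemma pv_pyGet_nonneg (cs : List Char) (i : Int) (h0 : 0 ≤ i) (hm : i.toNat < cs.length) :
    PySem.List.pyGet? cs i = some (cs[i.toNat]'hm) := by
  simp only [PySem.List.pyGet?, PySem.List.pyIdx?, if_pos h0,
    if_pos (show i < (cs.length : Int) by omega)]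
  exact List.getElem?_eq_getElem hm

lemma pv_pyGet_neg (cs : List Char) (i : Int) (h1 : i < 0) (h2 : -(cs.length : Int) ≤ i) :
    PySem.List.pyGet? cs i = some (cs[((cs.length : Int) + i).toNat]'(by omega)) := by
  have hk : cs.length - (-i).toNat = ((cs.length : Int) + i).toNat := by omega
  simp only [PySem.List.pyGet?, PySem.List.pyIdx?, if_neg (show ¬ 0 ≤ i by omega),
    if_pos h2, hk]
  exact List.getElem?_eq_getElem (by omega)

lemma pv_letra_eq {letra : String} {q : Char} (hq : letra.toList = [q]) (c : Char) :
    (letra = String.ofList [c]) ↔ q = c := by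
  rw [← String.toList_inj, String.toList_ofList, hq]
  simp

lemma pv_get_bridge (alfabeto : String) (i : Int) :
    PySem.Str.pyGet? alfabeto i = PySem.List.pyGet? alfabeto.toList i := by
  simp

lemma pvAuxA_succ (letra alfabeto : String) (f : Nat) (n : Int) (acc : String) :
    pvAuxA letra alfabeto (f+1) n acc =
      (if n > 25 then pvAuxA letra alfabeto f 0 acc
       else
        match PySem.Str.pyGet? alfabeto n with
        | none => ""
        | some c =>
          if letra = String.ofList [c] then acc
          else pvAuxA letra alfabeto f (n+1) (acc ++ String.ofList [c])) := rfl

-- Phase-1 characterisation of A's recursion: the letter occurs in the current scan window,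
-- so A returns acc plus the window prefix before it, never resetting.
lemma pvL1 (letra alfabeto : String) (q : Char) (hq : letra.toList = [q]) :
    ∀ (fuel : Nat) (n : Int) (acc : String), n ≤ 25 →
    (n < 0 → -(alfabeto.toList.length : Int) ≤ n) →
    q ∈ pvScan alfabeto.toList n → (26 - n).toNat + 1 ≤ fuel →
    pvAuxA letra alfabeto fuel n acc =
      String.ofList (acc.toList ++ pvB (pvScan alfabeto.toList n) q) := by
  intro fuel
  induction fuel with
  | zero => intro n acc _ _ _ hfuel; omega
  | succ f ih =>
    intro n acc h25 hneg hmem hfuel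
    set cs := alfabeto.toList with hcs
    by_cases hn : 0 ≤ n
    · have hne : pvScan cs n ≠ [] := List.ne_nil_of_mem hmem
      have hmN : n.toNat < cs.length := by
        by_contra hh
        apply hne
        rw [pv_scan_nonneg cs n hn, List.drop_eq_nil_of_le (by omega)]
        simp
      have hcons := pv_scan_cons_nonneg cs n hn (by omega) hmN
      have hget : PySem.Str.pyGet? alfabeto n = some (cs[n.toNat]) := by
        rw [pv_get_bridge]; exact pv_pyGet_nonneg cs n hn hmN
      simp only [pvAuxA, hget]
      rw [if_neg (show ¬ n > 25 by omega)]
      by_cases hcq : q = cs[n.toNat]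
      · rw [if_pos ((pv_letra_eq hq _).mpr hcq)]
        rw [hcons, ← hcq, pvB_cons_self]
        simp
      · rw [if_neg (fun h => hcq ((pv_letra_eq hq _).mp h))]
        have hmem' : q ∈ pvScan cs (n + 1) := by
          rw [hcons] at hmem
          rcases List.mem_cons.mp hmem with h | h
          · exact absurd h hcq
          · exact h
        have h25' : n + 1 ≤ 25 := by
          by_contra hh
          have : n + 1 = 26 := by omega
          rw [this, pv_scan_26] at hmem'
          exact absurd hmem' (List.not_mem_nil)
        rw [ih (n+1) (acc ++ String.ofList [cs[n.toNat]]) h25' (by omega) hmem' (by omega)]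
        rw [hcons, pvB_cons_ne _ (fun h => hcq h.symm)]
        simp
    · have hn0 : n < 0 := by omega
      have hb := hneg hn0
      by_cases hn1 : n + 1 < 0
      · have hcons := pv_scan_cons_neg cs n hn1 hb
        have hget : PySem.Str.pyGet? alfabeto n = some (cs[((cs.length : Int) + n).toNat]'(by omega)) := by
          rw [pv_get_bridge]; exact pv_pyGet_neg cs n hn0 hb
        simp only [pvAuxA, hget]
        rw [if_neg (show ¬ n > 25 by omega)]
        by_cases hcq : q = cs[((cs.length : Int) + n).toNat]'(by omega)
        · rw [if_pos ((pv_letra_eq hq _).mpr hcq)]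
          rw [hcons, ← hcq, pvB_cons_self]
          simp
        · rw [if_neg (fun h => hcq ((pv_letra_eq hq _).mp h))]
          have hmem' : q ∈ pvScan cs (n + 1) := by
            rw [hcons] at hmem
            rcases List.mem_cons.mp hmem with h | h
            · exact absurd h hcq
            · exact h
          rw [ih (n+1) _ (by omega) (by omega) hmem' (by omega)]
          rw [hcons, pvB_cons_ne _ (fun h => hcq h.symm)]
          simp
      · have hn' : n = -1 := by omega
        subst hn'
        have hlen : 1 ≤ cs.length := by omega
        have hone := pv_scan_neg_one cs hlen
        have hidx : ((cs.length : Int) + -1).toNat = cs.length - 1 := by omega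
        rw [hone] at hmem
        have hcq : q = cs[cs.length - 1]'(by omega) := by simpa using hmem
        have hget : PySem.Str.pyGet? alfabeto (-1) = some (cs[((cs.length : Int) + -1).toNat]'(by omega)) := by
          rw [pv_get_bridge]; exact pv_pyGet_neg cs (-1) (by omega) hb
        simp only [pvAuxA, hget]
        rw [if_neg (show ¬ (-1 : Int) > 25 by omega)]
        rw [if_pos ((pv_letra_eq hq _).mpr (by simp only [hidx]; exact hcq))]
        rw [hone, ← hcq, pvB_cons_self]
        simp

-- Phase-2 characterisations: the letter is not in the current scan window but appears in the
-- wrap-around window alfabeto[:26], so A appends the whole scan window and continues from 0.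
lemma pvL3 (letra alfabeto : String) (q : Char) (hq : letra.toList = [q]) :
    ∀ (fuel : Nat) (n : Int) (acc : String), n < 0 →
    -(alfabeto.toList.length : Int) ≤ n →
    q ∉ pvScan alfabeto.toList n → q ∈ pvT alfabeto.toList → (26 - n).toNat + 1 ≤ fuel →
    pvAuxA letra alfabeto fuel n acc =
      String.ofList (acc.toList ++ (pvScan alfabeto.toList n ++ pvB (pvT alfabeto.toList) q)) := by
  intro fuel
  induction fuel with
  | zero => intro n acc _ _ _ _ hfuel; omega
  | succ f ih =>
    intro n acc hn0 hb hnot hT hfuel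
    set cs := alfabeto.toList with hcs
    by_cases hn1 : n + 1 < 0
    · have hcons := pv_scan_cons_neg cs n hn1 hb
      have hget : PySem.Str.pyGet? alfabeto n = some (cs[((cs.length : Int) + n).toNat]'(by omega)) := by
        rw [pv_get_bridge]; exact pv_pyGet_neg cs n hn0 hb
      have hcq : ¬ q = cs[((cs.length : Int) + n).toNat]'(by omega) := by
        intro h; exact hnot (by rw [hcons, h]; exact List.mem_cons_self)
      simp only [pvAuxA, hget]
      rw [if_neg (show ¬ n > 25 by omega), if_neg (fun h => hcq ((pv_letra_eq hq _).mp h))]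
      have hnot' : q ∉ pvScan cs (n + 1) := fun h => hnot (by rw [hcons]; exact List.mem_cons_of_mem _ h)
      rw [ih (n+1) _ (by omega) (by omega) hnot' hT (by omega)]
      rw [hcons]
      simp
    · have hn' : n = -1 := by omega
      subst hn'
      have hlen : 1 ≤ cs.length := by omega
      have hone := pv_scan_neg_one cs hlen
      have hidx : ((cs.length : Int) + -1).toNat = cs.length - 1 := by omega
      have hget : PySem.Str.pyGet? alfabeto (-1) = some (cs[((cs.length : Int) + -1).toNat]'(by omega)) := by
        rw [pv_get_bridge]; exact pv_pyGet_neg cs (-1) (by omega) hb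
      have hcq : ¬ q = cs[((cs.length : Int) + -1).toNat]'(by omega) := by
        simp only [hidx]
        intro h; exact hnot (by rw [hone, h]; exact List.mem_cons_self)
      simp only [pvAuxA, hget]
      rw [if_neg (show ¬ (-1 : Int) > 25 by omega)]
      rw [if_neg (fun h => hcq ((pv_letra_eq hq _).mp h))]
      rw [show (-1 : Int) + 1 = 0 from by norm_num]
      rw [pvL1 letra alfabeto q hq f 0 _ (by omega) (by omega)
            (by rwa [pv_scan_zero]) (by omega)]
      rw [hone, pv_scan_zero]
      simp [hidx]
      rfl

lemma pvL2 (letra alfabeto : String) (q : Char) (hq : letra.toList = [q]) :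
    ∀ (fuel : Nat) (n : Int) (acc : String), 0 ≤ n → n ≤ 25 →
    26 ≤ alfabeto.toList.length →
    q ∉ pvScan alfabeto.toList n → q ∈ pvT alfabeto.toList → (26 - n).toNat + 28 ≤ fuel →
    pvAuxA letra alfabeto fuel n acc =
      String.ofList (acc.toList ++ (pvScan alfabeto.toList n ++ pvB (pvT alfabeto.toList) q)) := by
  intro fuel
  induction fuel with
  | zero => intro n acc _ _ _ _ _ hfuel; omega
  | succ f ih =>
    intro n acc hn0 h25 hm hnot hT hfuel
    set cs := alfabeto.toList with hcs
    have hmN : n.toNat < cs.length := by omega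
    have hcons := pv_scan_cons_nonneg cs n hn0 (by omega) hmN
    have hget : PySem.Str.pyGet? alfabeto n = some (cs[n.toNat]) := by
      rw [pv_get_bridge]; exact pv_pyGet_nonneg cs n hn0 hmN
    have hcq : ¬ q = cs[n.toNat] := by
      intro h; exact hnot (by rw [hcons, h]; exact List.mem_cons_self)
    simp only [pvAuxA, hget]
    rw [if_neg (show ¬ n > 25 by omega), if_neg (fun h => hcq ((pv_letra_eq hq _).mp h))]
    by_cases h25' : n + 1 ≤ 25
    · have hnot' : q ∉ pvScan cs (n + 1) := fun h => hnot (by rw [hcons]; exact List.mem_cons_of_mem _ h)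
      rw [ih (n+1) _ (by omega) h25' hm hnot' hT (by omega)]
      rw [hcons]
      simp
    · have hn25 : n = 25 := by omega
      subst hn25
      match f, (by omega : 1 ≤ f) with
      | f' + 1, _ =>
        simp only [pvAuxA]
        rw [if_pos (show (25:Int) + 1 > 25 by omega)]
        rw [pvL1 letra alfabeto q hq f' 0 _ (by omega) (by omega)
              (by rwa [pv_scan_zero]) (by omega)]
        rw [hcons, show ((25:Int) + 1) = 26 from by norm_num, pv_scan_26, pv_scan_zero]
        simp
        rfl

lemma pv_mem_map {letra : String} {q : Char} (hq : letra.toList = [q]) (L : List Char) :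
    letra.toList ∈ L.map (fun c => [c]) ↔ q ∈ L := by
  rw [hq]
  simp [List.mem_map]

-- A's value under Pre_: the accumulator plus the prefix of the full visit window before letra.
lemma pvA_eq (letra alfabeto : String) (n : Int) (acc : String) (q : Char) (hq : letra.toList = [q])
    (hpre : Pre_recorrer_lista_aux letra n alfabeto acc) :
    recorrer_lista_aux letra n alfabeto acc =
      String.ofList (acc.toList ++
        pvB (pvScan alfabeto.toList (if n > 25 then 0 else n) ++ pvT alfabeto.toList) q) := by
  obtain ⟨hb, hdisj⟩ := hpre
  set cs := alfabeto.toList with hcs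
  have hdisj' : q ∈ pvScan cs (if n > 25 then 0 else n) ∨
      ((0 ≤ (if n > 25 then 0 else n) → 26 ≤ (cs.length : Int)) ∧ q ∈ pvT cs) := by
    rcases hdisj with h | ⟨hc, h⟩
    · left; rwa [pv_mem_map hq] at h
    · right; exact ⟨hc, by rwa [pv_mem_map hq] at h⟩
  unfold recorrer_lista_aux
  by_cases hn : n > 25
  · rw [if_pos hn] at hdisj' ⊢
    have hq0 : q ∈ pvScan cs 0 := by
      rcases hdisj' with h | ⟨_, h⟩
      · exact h
      · rwa [pv_scan_zero]
    have hfuel : (26 - n).toNat + 28 = 27 + 1 := by omega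
    rw [hfuel, pvAuxA_succ, if_pos hn]
    rw [pvL1 letra alfabeto q hq 27 0 acc (by omega) (by omega) hq0 (by omega)]
    rw [pvB_left _ hq0]
  · rw [if_neg hn] at hdisj' hb ⊢
    by_cases hin : q ∈ pvScan cs n
    · rw [pvL1 letra alfabeto q hq _ n acc (by omega) hb hin (by omega)]
      rw [pvB_left _ hin]
    · have hwrap : (0 ≤ n → 26 ≤ (cs.length : Int)) ∧ q ∈ pvT cs := by
        rcases hdisj' with h | h
        · exact absurd h hin
        · exact h
      obtain ⟨hc, hT⟩ := hwrap
      rw [pvB_right hin]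
      by_cases hn0 : 0 ≤ n
      · exact pvL2 letra alfabeto q hq _ n acc hn0 (by omega) (by exact_mod_cast hc hn0) hin hT (by omega)
      · exact pvL3 letra alfabeto q hq _ n acc (by omega) (hb (by omega)) hin hT (by omega)

-- B-side characterisations of the loop, mirroring its three phases.
lemma pvBL1 (letra alfabeto : String) (q : Char) (hq : letra.toList = [q]) :
    ∀ (fuel : Nat) (n : Int) (partes : List Char), n ≤ 25 →
    (n < 0 → -(alfabeto.toList.length : Int) ≤ n) →
    q ∈ pvScan alfabeto.toList n → (26 - n).toNat + 1 ≤ fuel →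
    pvLoopB letra alfabeto fuel n partes =
      some (partes ++ pvB (pvScan alfabeto.toList n) q) := by
  intro fuel
  induction fuel with
  | zero => intro n partes _ _ _ hfuel; omega
  | succ f ih =>
    intro n partes h25 hneg hmem hfuel
    set cs := alfabeto.toList with hcs
    by_cases hn : 0 ≤ n
    · have hne : pvScan cs n ≠ [] := List.ne_nil_of_mem hmem
      have hmN : n.toNat < cs.length := by
        by_contra hh
        apply hne
        rw [pv_scan_nonneg cs n hn, List.drop_eq_nil_of_le (by omega)]
        simp
      have hcons := pv_scan_cons_nonneg cs n hn (by omega) hmN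
      have hget : PySem.Str.pyGet? alfabeto n = some (cs[n.toNat]) := by
        rw [pv_get_bridge]; exact pv_pyGet_nonneg cs n hn hmN
      simp only [pvLoopB, hget]
      by_cases hcq : q = cs[n.toNat]
      · have hEq : String.ofList [cs[n.toNat]] = letra := ((pv_letra_eq hq _).mpr hcq).symm
        rw [if_neg (fun hne => hne hEq)]
        rw [hcons, ← hcq, pvB_cons_self, List.append_nil]
      · rw [if_pos (fun h => hcq ((pv_letra_eq hq _).mp h.symm))]
        have hmem' : q ∈ pvScan cs (n + 1) := by
          rw [hcons] at hmem
          rcases List.mem_cons.mp hmem with h | h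
          · exact absurd h hcq
          · exact h
        have h25' : n + 1 ≤ 25 := by
          by_contra hh
          have : n + 1 = 26 := by omega
          rw [this, pv_scan_26] at hmem'
          exact absurd hmem' (List.not_mem_nil)
        rw [if_neg (show ¬ n = 25 by omega)]
        rw [ih (n+1) (partes ++ [cs[n.toNat]]) h25' (by omega) hmem' (by omega)]
        rw [hcons, pvB_cons_ne _ (fun h => hcq h.symm)]
        simp
    · have hn0 : n < 0 := by omega
      have hb := hneg hn0
      by_cases hn1 : n + 1 < 0
      · have hcons := pv_scan_cons_neg cs n hn1 hb
        have hget : PySem.Str.pyGet? alfabeto n = some (cs[((cs.length : Int) + n).toNat]'(by omega)) := by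
          rw [pv_get_bridge]; exact pv_pyGet_neg cs n hn0 hb
        simp only [pvLoopB, hget]
        by_cases hcq : q = cs[((cs.length : Int) + n).toNat]'(by omega)
        · have hEq : String.ofList [cs[((cs.length : Int) + n).toNat]'(by omega)] = letra :=
            ((pv_letra_eq hq _).mpr hcq).symm
          rw [if_neg (fun hne => hne hEq)]
          rw [hcons, ← hcq, pvB_cons_self, List.append_nil]
        · rw [if_pos (fun h => hcq ((pv_letra_eq hq _).mp h.symm))]
          have hmem' : q ∈ pvScan cs (n + 1) := by
            rw [hcons] at hmem
            rcases List.mem_cons.mp hmem with h | h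
            · exact absurd h hcq
            · exact h
          rw [if_neg (show ¬ n = 25 by omega)]
          rw [ih (n+1) _ (by omega) (by omega) hmem' (by omega)]
          rw [hcons, pvB_cons_ne _ (fun h => hcq h.symm)]
          simp
      · have hn' : n = -1 := by omega
        subst hn'
        have hlen : 1 ≤ cs.length := by omega
        have hone := pv_scan_neg_one cs hlen
        have hidx : ((cs.length : Int) + -1).toNat = cs.length - 1 := by omega
        rw [hone] at hmem
        have hcq : q = cs[cs.length - 1]'(by omega) := by simpa using hmem
        have hget : PySem.Str.pyGet? alfabeto (-1) = some (cs[((cs.length : Int) + -1).toNat]'(by omega)) := by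
          rw [pv_get_bridge]; exact pv_pyGet_neg cs (-1) (by omega) hb
        simp only [pvLoopB, hget]
        have hEq : String.ofList [cs[((cs.length : Int) + -1).toNat]'(by omega)] = letra :=
          ((pv_letra_eq hq _).mpr (by simp only [hidx]; exact hcq)).symm
        rw [if_neg (fun hne => hne hEq)]
        rw [hone, ← hcq, pvB_cons_self, List.append_nil]

lemma pvBL3 (letra alfabeto : String) (q : Char) (hq : letra.toList = [q]) :
    ∀ (fuel : Nat) (n : Int) (partes : List Char), n < 0 →
    -(alfabeto.toList.length : Int) ≤ n →
    q ∉ pvScan alfabeto.toList n → q ∈ pvT alfabeto.toList → (26 - n).toNat + 1 ≤ fuel →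
    pvLoopB letra alfabeto fuel n partes =
      some (partes ++ (pvScan alfabeto.toList n ++ pvB (pvT alfabeto.toList) q)) := by
  intro fuel
  induction fuel with
  | zero => intro n partes _ _ _ _ hfuel; omega
  | succ f ih =>
    intro n partes hn0 hb hnot hT hfuel
    set cs := alfabeto.toList with hcs
    by_cases hn1 : n + 1 < 0
    · have hcons := pv_scan_cons_neg cs n hn1 hb
      have hget : PySem.Str.pyGet? alfabeto n = some (cs[((cs.length : Int) + n).toNat]'(by omega)) := by
        rw [pv_get_bridge]; exact pv_pyGet_neg cs n hn0 hb
      have hcq : ¬ q = cs[((cs.length : Int) + n).toNat]'(by omega) := by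
        intro h; exact hnot (by rw [hcons, h]; exact List.mem_cons_self)
      simp only [pvLoopB, hget]
      rw [if_pos (fun h => hcq ((pv_letra_eq hq _).mp h.symm))]
      have hnot' : q ∉ pvScan cs (n + 1) := fun h => hnot (by rw [hcons]; exact List.mem_cons_of_mem _ h)
      rw [if_neg (show ¬ n = 25 by omega)]
      rw [ih (n+1) _ (by omega) (by omega) hnot' hT (by omega)]
      rw [hcons]
      simp
    · have hn' : n = -1 := by omega
      subst hn'
      have hlen : 1 ≤ cs.length := by omega
      have hone := pv_scan_neg_one cs hlen
      have hidx : ((cs.length : Int) + -1).toNat = cs.length - 1 := by omega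
      have hget : PySem.Str.pyGet? alfabeto (-1) = some (cs[((cs.length : Int) + -1).toNat]'(by omega)) := by
        rw [pv_get_bridge]; exact pv_pyGet_neg cs (-1) (by omega) hb
      have hcq : ¬ q = cs[((cs.length : Int) + -1).toNat]'(by omega) := by
        simp only [hidx]
        intro h; exact hnot (by rw [hone, h]; exact List.mem_cons_self)
      simp only [pvLoopB, hget]
      rw [if_pos (fun h => hcq ((pv_letra_eq hq _).mp h.symm))]
      rw [if_neg (show ¬ (-1 : Int) = 25 by omega)]
      rw [show (-1 : Int) + 1 = 0 from by norm_num]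
      rw [pvBL1 letra alfabeto q hq f 0 _ (by omega) (by omega)
            (by rwa [pv_scan_zero]) (by omega)]
      rw [hone, pv_scan_zero]
      simp [hidx]
      rfl

lemma pvBL2 (letra alfabeto : String) (q : Char) (hq : letra.toList = [q]) :
    ∀ (fuel : Nat) (n : Int) (partes : List Char), 0 ≤ n → n ≤ 25 →
    26 ≤ alfabeto.toList.length →
    q ∉ pvScan alfabeto.toList n → q ∈ pvT alfabeto.toList → (26 - n).toNat + 28 ≤ fuel →
    pvLoopB letra alfabeto fuel n partes =
      some (partes ++ (pvScan alfabeto.toList n ++ pvB (pvT alfabeto.toList) q)) := by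
  intro fuel
  induction fuel with
  | zero => intro n partes _ _ _ _ _ hfuel; omega
  | succ f ih =>
    intro n partes hn0 h25 hm hnot hT hfuel
    set cs := alfabeto.toList with hcs
    have hmN : n.toNat < cs.length := by omega
    have hcons := pv_scan_cons_nonneg cs n hn0 (by omega) hmN
    have hget : PySem.Str.pyGet? alfabeto n = some (cs[n.toNat]) := by
      rw [pv_get_bridge]; exact pv_pyGet_nonneg cs n hn0 hmN
    have hcq : ¬ q = cs[n.toNat] := by
      intro h; exact hnot (by rw [hcons, h]; exact List.mem_cons_self)
    simp only [pvLoopB, hget]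
    rw [if_pos (fun h => hcq ((pv_letra_eq hq _).mp h.symm))]
    by_cases h25' : n + 1 ≤ 25
    · have hnot' : q ∉ pvScan cs (n + 1) := fun h => hnot (by rw [hcons]; exact List.mem_cons_of_mem _ h)
      rw [if_neg (show ¬ n = 25 by omega)]
      rw [ih (n+1) _ (by omega) h25' hm hnot' hT (by omega)]
      rw [hcons]
      simp
    · have hn25 : n = 25 := by omega
      subst hn25
      rw [if_pos rfl]
      rw [pvBL1 letra alfabeto q hq f 0 _ (by omega) (by omega)
            (by rwa [pv_scan_zero]) (by omega)]
      rw [hcons, show ((25:Int) + 1) = 26 from by norm_num, pv_scan_26, pv_scan_zero]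
      simp
      rfl

-- B's value under Pre_: the loop returns the same prefix of the full visit window.
lemma pvAlt_eq (letra alfabeto : String) (n : Int) (acc : String) (q : Char) (hq : letra.toList = [q])
    (hpre : Pre_recorrer_lista_aux letra n alfabeto acc) :
    recorrer_lista_aux_alt letra n alfabeto acc =
      String.ofList (acc.toList ++
        pvB (pvScan alfabeto.toList (if n > 25 then 0 else n) ++ pvT alfabeto.toList) q) := by
  obtain ⟨hb, hdisj⟩ := hpre
  set cs := alfabeto.toList with hcs
  have hdisj' : q ∈ pvScan cs (if n > 25 then 0 else n) ∨
      ((0 ≤ (if n > 25 then 0 else n) → 26 ≤ (cs.length : Int)) ∧ q ∈ pvT cs) := by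
    rcases hdisj with h | ⟨hc, h⟩
    · left; rwa [pv_mem_map hq] at h
    · right; exact ⟨hc, by rwa [pv_mem_map hq] at h⟩
  have hjoin : ∀ partes : List Char,
      (match some partes with
        | none => ""
        | some partes => acc ++ String.ofList partes) = String.ofList (acc.toList ++ partes) := by
    intro partes
    refine String.toList_inj.mp ?_
    simp
  simp only [recorrer_lista_aux_alt]
  by_cases hn : n > 25
  · rw [if_pos hn] at hdisj' ⊢
    have hq0 : q ∈ pvScan cs 0 := by
      rcases hdisj' with h | ⟨_, h⟩
      · exact h
      · rwa [pv_scan_zero]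
    rw [pvBL1 letra alfabeto q hq _ 0 [] (by omega) (by omega) hq0 (by omega), hjoin]
    rw [pvB_left _ hq0, List.nil_append]
  · rw [if_neg hn] at hdisj' hb ⊢
    by_cases hin : q ∈ pvScan cs n
    · rw [pvBL1 letra alfabeto q hq _ n [] (by omega) hb hin (by omega), hjoin]
      rw [pvB_left _ hin, List.nil_append]
    · have hwrap : (0 ≤ n → 26 ≤ (cs.length : Int)) ∧ q ∈ pvT cs := by
        rcases hdisj' with h | h
        · exact absurd h hin
        · exact h
      obtain ⟨hc, hT⟩ := hwrap
      rw [pvB_right hin]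
      by_cases hn0 : 0 ≤ n
      · rw [pvBL2 letra alfabeto q hq _ n [] hn0 (by omega) (by exact_mod_cast hc hn0) hin hT (by omega), hjoin,
            List.nil_append]
      · rw [pvBL3 letra alfabeto q hq _ n [] (by omega) (hb (by omega)) hin hT (by omega), hjoin,
            List.nil_append]

-- ===== VERDICT (by name: the statement is the Claim_ definition above) =====
theorem recorrer_lista_aux_spec : Claim_equal_recorrer_lista_aux := by
  intro letra n alfabeto nueva_lista _ hpre
  unfold Spec_recorrer_lista_aux
  obtain ⟨q, hq⟩ : ∃ q, letra.toList = [q] := by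
    obtain ⟨_, hdisj⟩ := hpre
    rcases hdisj with h | ⟨_, h⟩ <;>
      · obtain ⟨c, _, hc⟩ := List.mem_map.mp h
        exact ⟨c, hc.symm⟩
  rw [pvA_eq letra alfabeto n nueva_lista q hq hpre,
      pvAlt_eq letra alfabeto n nueva_lista q hq hpre]
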